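-- pv_equiv track=rewrite | github.com/imosudi/Creovue | Creovue/models/trends.py | get_channel_category
-- ===== SOURCE A (Python) =====
-- from collections import Counter, defaultdict
--
-- def get_channel_category(keywords_str):
--     """Determine channel category from keywords"""
--     if not keywords_str:
--         return "General"
--
--     keywords = keywords_str.lower().split(',')
--
--     # Define category keywords
--     categories = {
--         "Gaming": ["gaming", "games", "gamer", "gameplay", "playthrough", "minecraft", "fortnite"],
--         "Technology": ["tech", "technology", "coding", "programming", "computers", "software", "hardware"],
--         "Entertainment": ["vlog", "comedy", "funny", "entertainment", "reaction", "challenge"],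
--         "Music": ["music", "song", "singer", "band", "rap", "hip hop", "rock"],
--         "Education": ["learn", "education", "tutorial", "how to", "course", "lesson"],
--         "Lifestyle": ["lifestyle", "fashion", "beauty", "makeup", "fitness", "health"]
--     }
--
--     # Count category matches
--     category_scores = Counter()
--     for category, terms in categories.items():
--         for term in terms:
--             if any(term in kw for kw in keywords):
--                 category_scores[category] += 1
--
--     # Return best match or default
--     if category_scores:
--         return category_scores.most_common(1)[0][0]
--     return "General"
-- ===== SOURCE B (Python) =====
-- # Flat (term, category) table + one set-building pass over keywords, then a
-- # first-strict-max scan in category order (same tie-break as Counter.most_common).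
-- CAT_TERMS = [
--     ("gaming", "Gaming"), ("games", "Gaming"), ("gamer", "Gaming"),
--     ("gameplay", "Gaming"), ("playthrough", "Gaming"), ("minecraft", "Gaming"),
--     ("fortnite", "Gaming"),
--     ("tech", "Technology"), ("technology", "Technology"), ("coding", "Technology"),
--     ("programming", "Technology"), ("computers", "Technology"),
--     ("software", "Technology"), ("hardware", "Technology"),
--     ("vlog", "Entertainment"), ("comedy", "Entertainment"), ("funny", "Entertainment"),
--     ("entertainment", "Entertainment"), ("reaction", "Entertainment"),
--     ("challenge", "Entertainment"),
--     ("music", "Music"), ("song", "Music"), ("singer", "Music"), ("band", "Music"),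
--     ("rap", "Music"), ("hip hop", "Music"), ("rock", "Music"),
--     ("learn", "Education"), ("education", "Education"), ("tutorial", "Education"),
--     ("how to", "Education"), ("course", "Education"), ("lesson", "Education"),
--     ("lifestyle", "Lifestyle"), ("fashion", "Lifestyle"), ("beauty", "Lifestyle"),
--     ("makeup", "Lifestyle"), ("fitness", "Lifestyle"), ("health", "Lifestyle"),
-- ]
--
-- CATEGORY_ORDER = ["Gaming", "Technology", "Entertainment", "Music", "Education", "Lifestyle"]
--
--
-- def get_channel_category(keywords_str):
--     """Determine channel category from keywords"""
--     if not keywords_str: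
--         return "General"
--
--     matched = set()
--     for kw in keywords_str.lower().split(','):
--         for term, cat in CAT_TERMS:
--             if term in kw:
--                 matched.add((cat, term))
--
--     best, best_score = "General", 0
--     for cat in CATEGORY_ORDER:
--         score = sum(1 for c, _ in matched if c == cat)
--         if best_score < score:
--             best, best_score = cat, score
--     return best
-- ===== Notes on version B (the rewrite author's own statement) =====
-- stated objective: alternative
-- what changed: Replaces the per-(category,term) any()-scan + Counter.most_common sort with one pass over the keywords against a flat (term, category) table collecting a set of matched pairs, followed by a per-category tally and a first-strict-max scan in original category order (same tie-break as Counter.most_common's stable sort).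
import Mathlib
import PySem

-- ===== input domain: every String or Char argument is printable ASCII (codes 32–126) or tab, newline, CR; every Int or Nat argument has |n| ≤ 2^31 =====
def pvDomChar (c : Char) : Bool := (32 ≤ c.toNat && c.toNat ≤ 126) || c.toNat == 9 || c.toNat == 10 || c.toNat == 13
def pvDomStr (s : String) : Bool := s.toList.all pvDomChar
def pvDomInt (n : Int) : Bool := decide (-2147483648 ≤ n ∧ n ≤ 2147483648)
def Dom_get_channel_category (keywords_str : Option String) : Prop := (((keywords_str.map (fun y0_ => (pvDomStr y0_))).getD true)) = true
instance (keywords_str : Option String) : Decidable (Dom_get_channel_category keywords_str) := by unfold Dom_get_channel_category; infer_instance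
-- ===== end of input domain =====

-- B replaces the Counter-of-nested-scans with one set-building pass over a flat
-- (term, category) table and a first-strict-max scan in category order (objective: alternative).

-- ===== PORT A =====
-- the literal `categories` dict
def pvCatsA : PySem.Dict String (List String) := PySem.Dict.ofList
  [("Gaming", ["gaming", "games", "gamer", "gameplay", "playthrough", "minecraft", "fortnite"]),
   ("Technology", ["tech", "technology", "coding", "programming", "computers", "software", "hardware"]),
   ("Entertainment", ["vlog", "comedy", "funny", "entertainment", "reaction", "challenge"]),
   ("Music", ["music", "song", "singer", "band", "rap", "hip hop", "rock"]),
   ("Education", ["learn", "education", "tutorial", "how to", "course", "lesson"]),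
   ("Lifestyle", ["lifestyle", "fashion", "beauty", "makeup", "fitness", "health"])]

-- the Counter loop: `category_scores[category] += 1` is `modify c 0 (· + 1)`
def pvScoresA (kws : List String) : PySem.Dict String Int :=
  pvCatsA.items.foldl
    (fun d p => p.2.foldl
      (fun d t => if kws.any (fun kw => PySem.Str.isIn t kw) then d.modify p.1 0 (· + 1) else d) d)
    PySem.Dict.empty

def get_channel_category (keywords_str : Option String) : String :=
  match keywords_str with
  | none => "General"                    -- `not keywords_str`
  | some s =>
    if s = "" then "General"
    else
      let scores := pvScoresA (PySem.Str.split? (PySem.Str.lower s) "," |>.getD [])  -- sep "," ≠ "": split? is exact (some)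
      if scores.size ≠ 0 then
        -- most_common(1)[0][0]: head of the stable reverse sort by count ([] branch unreachable under the guard)
        match PySem.List.sorted scores.items (fun p => p.2) true with
        | q :: _ => q.1
        | [] => "General"
      else "General"

-- ===== PORT B =====
def pvPairsB : List (String × String) :=
  [("gaming", "Gaming"), ("games", "Gaming"), ("gamer", "Gaming"), ("gameplay", "Gaming"),
   ("playthrough", "Gaming"), ("minecraft", "Gaming"), ("fortnite", "Gaming"),
   ("tech", "Technology"), ("technology", "Technology"), ("coding", "Technology"),
   ("programming", "Technology"), ("computers", "Technology"), ("software", "Technology"),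
   ("hardware", "Technology"),
   ("vlog", "Entertainment"), ("comedy", "Entertainment"), ("funny", "Entertainment"),
   ("entertainment", "Entertainment"), ("reaction", "Entertainment"), ("challenge", "Entertainment"),
   ("music", "Music"), ("song", "Music"), ("singer", "Music"), ("band", "Music"),
   ("rap", "Music"), ("hip hop", "Music"), ("rock", "Music"),
   ("learn", "Education"), ("education", "Education"), ("tutorial", "Education"),
   ("how to", "Education"), ("course", "Education"), ("lesson", "Education"),
   ("lifestyle", "Lifestyle"), ("fashion", "Lifestyle"), ("beauty", "Lifestyle"),
   ("makeup", "Lifestyle"), ("fitness", "Lifestyle"), ("health", "Lifestyle")]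

def pvOrderB : List String :=
  ["Gaming", "Technology", "Entertainment", "Music", "Education", "Lifestyle"]

def pvMatchedB (kws : List String) : PySem.Set (String × String) :=
  kws.foldl
    (fun m kw => pvPairsB.foldl
      (fun m p => if PySem.Str.isIn p.1 kw then PySem.Set.add m (p.2, p.1) else m) m)
    PySem.Set.empty

def get_channel_category_alt (keywords_str : Option String) : String :=
  match keywords_str with
  | none => "General"
  | some s =>
    if s = "" then "General"
    else
      let m := pvMatchedB (PySem.Str.split? (PySem.Str.lower s) "," |>.getD [])  -- sep "," ≠ "": split? is exact (some)
      (pvOrderB.foldl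
        (fun (acc : String × Int) c =>
          let sc : Int := (List.countP (fun q => q.1 == c) m : Int)  -- sum(1 for c,_ in matched if c == cat)
          if acc.2 < sc then (c, sc) else acc)
        ("General", 0)).1

-- ===== PRECONDITION & SPEC =====
def Spec_get_channel_category (keywords_str : Option String) (out : String) : Prop := out = get_channel_category_alt keywords_str
instance (keywords_str : Option String) (out : String) : Decidable (Spec_get_channel_category keywords_str out) := by unfold Spec_get_channel_category; infer_instance

-- ===== CLAIM (what is proved, stated in full; the proofs are below) =====
def Claim_equal_get_channel_category : Prop := ∀ (keywords_str : Option String), Dom_get_channel_category keywords_str → Spec_get_channel_category keywords_str (get_channel_category keywords_str)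


-- ===== LEMMAS AND PROOFS =====

-- ---- B side: membership and distinctness of the matched set ----

theorem pv_mem_inner (kw : String) (ps : List (String × String))
    (m : PySem.Set (String × String)) (q : String × String) :
    q ∈ ps.foldl (fun m p => if PySem.Str.isIn p.1 kw then PySem.Set.add m (p.2, p.1) else m) m ↔
      q ∈ m ∨ ∃ p ∈ ps, PySem.Str.isIn p.1 kw = true ∧ q = (p.2, p.1) := by
  induction ps generalizing m with
  | nil => simp
  | cons p ps ih =>
    simp only [List.foldl_cons]
    by_cases h : PySem.Str.isIn p.1 kw = true
    · rw [if_pos h, ih]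
      simp only [PySem.Set.mem_add, List.mem_cons]
      aesop
    · rw [if_neg h, ih]
      simp only [List.mem_cons]
      aesop

theorem pv_nodup_inner (kw : String) (ps : List (String × String))
    (m : PySem.Set (String × String)) (hm : m.Nodup) :
    (ps.foldl (fun m p => if PySem.Str.isIn p.1 kw then PySem.Set.add m (p.2, p.1) else m) m).Nodup := by
  induction ps generalizing m with
  | nil => exact hm
  | cons p ps ih =>
    by_cases h : PySem.Str.isIn p.1 kw = true
    · rw [List.foldl_cons, if_pos h]; exact ih _ (PySem.Set.nodup_add _ _ hm)
    · rw [List.foldl_cons, if_neg h]; exact ih _ hm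

theorem pv_mem_matched (kws : List String) (q : String × String) :
    q ∈ pvMatchedB kws ↔
      ∃ p ∈ pvPairsB, q = (p.2, p.1) ∧ kws.any (fun kw => PySem.Str.isIn p.1 kw) = true := by
  have gen : ∀ (l : List String) (m : PySem.Set (String × String)),
      q ∈ l.foldl (fun m kw => pvPairsB.foldl
            (fun m p => if PySem.Str.isIn p.1 kw then PySem.Set.add m (p.2, p.1) else m) m) m ↔
        q ∈ m ∨ ∃ kw ∈ l, ∃ p ∈ pvPairsB, PySem.Str.isIn p.1 kw = true ∧ q = (p.2, p.1) := by
    intro l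
    induction l with
    | nil => simp
    | cons kw l ih =>
      intro m
      simp only [List.foldl_cons]
      rw [ih, pv_mem_inner]
      simp only [List.mem_cons]
      aesop
  unfold pvMatchedB
  rw [gen]
  simp only [List.any_eq_true]
  have : ∀ x : String × String, x ∈ (PySem.Set.empty : PySem.Set (String × String)) ↔ False := by
    simp [PySem.Set.empty]
  aesop

theorem pv_nodup_matched (kws : List String) : (pvMatchedB kws).Nodup := by
  unfold pvMatchedB
  have gen : ∀ (l : List String) (m : PySem.Set (String × String)), m.Nodup →
      (l.foldl (fun m kw => pvPairsB.foldl
          (fun m p => if PySem.Str.isIn p.1 kw then PySem.Set.add m (p.2, p.1) else m) m) m).Nodup := by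
    intro l
    induction l with
    | nil => exact fun m hm => hm
    | cons kw l ih =>
      intro m hm
      simp only [List.foldl_cons]
      exact ih _ (pv_nodup_inner _ _ _ hm)
  exact gen _ _ (by simp [PySem.Set.empty])

-- the per-category tally of B is the number of this category's terms matched anywhere
theorem pv_score (kws : List String) (c : String) :
    List.countP (fun q => q.1 == c) (pvMatchedB kws) =
      List.countP (fun t => kws.any (fun kw => PySem.Str.isIn t kw))
        ((pvPairsB.filter (fun p => p.2 == c)).map Prod.fst) := by
  have hnd : pvPairsB.Nodup := by decide
  set X : String → Bool := fun t => kws.any (fun kw => PySem.Str.isIn t kw) with hX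
  have hperm : List.Perm ((pvMatchedB kws).filter (fun q => q.1 == c))
      ((pvPairsB.filter (fun p => p.2 == c && X p.1)).map (fun p => (p.2, p.1))) := by
    rw [List.perm_ext_iff_of_nodup]
    · intro q
      simp only [List.mem_filter, List.mem_map, pv_mem_matched, Bool.and_eq_true, beq_iff_eq]
      constructor
      · rintro ⟨⟨r, hr, hq, hany⟩, hc⟩
        subst hq
        exact ⟨r, ⟨hr, by simpa using hc, hany⟩, rfl⟩
      · rintro ⟨r, ⟨hr1, hr2, hr3⟩, hq⟩
        subst hq
        exact ⟨⟨r, hr1, rfl, hr3⟩, by simpa using hr2⟩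
    · exact List.Nodup.filter _ (pv_nodup_matched kws)
    · exact List.Nodup.map (fun a b h => by
        cases a; cases b; simpa [Prod.ext_iff, and_comm] using h)
        (List.Nodup.filter _ hnd)
  calc List.countP (fun q => q.1 == c) (pvMatchedB kws)
      = ((pvMatchedB kws).filter (fun q => q.1 == c)).length := List.countP_eq_length_filter
    _ = ((pvPairsB.filter (fun p => p.2 == c && X p.1)).map (fun p => (p.2, p.1))).length :=
        hperm.length_eq
    _ = (pvPairsB.filter (fun p => p.2 == c && X p.1)).length := List.length_map ..
    _ = List.countP (fun p => p.2 == c && X p.1) pvPairsB :=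
        (List.countP_eq_length_filter ..).symm
    _ = List.countP (fun t => X t) ((pvPairsB.filter (fun p => p.2 == c)).map Prod.fst) := by
        rw [List.countP_map, List.countP_filter]
        exact List.countP_congr (fun p _ => by simp [Function.comp, Bool.and_comm])

-- ---- A side: the Counter loop appends one positive entry per category, in order ----

def pvIter (c : String) : Nat → PySem.Dict String Int → PySem.Dict String Int
  | 0, d => d
  | k + 1, d => pvIter c k (d.modify c 0 (· + 1))

theorem pv_foldl_iter (X : String → Bool) (c : String) (ts : List String)
    (d : PySem.Dict String Int) :
    ts.foldl (fun d t => if X t then d.modify c 0 (· + 1) else d) d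
      = pvIter c (ts.countP X) d := by
  induction ts generalizing d with
  | nil => rfl
  | cons t ts ih =>
    simp only [List.foldl_cons, List.countP_cons]
    by_cases h : X t = true
    · rw [if_pos h, ih, h]; rfl
    · rw [if_neg h, ih]
      simp [h]

theorem pv_getD_mk_append (l : List (String × Int)) (c : String) (v : Int)
    (h : ∀ p ∈ l, p.1 ≠ c) :
    (PySem.Dict.mk (l ++ [(c, v)])).getD c 0 = v := by
  induction l with
  | nil =>
    rw [PySem.Dict.getD_eq_get?_getD]
    simp [PySem.Dict.get?_mk_cons]
  | cons p l ih =>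
    rw [PySem.Dict.getD_eq_get?_getD] at ih ⊢
    rw [List.cons_append, PySem.Dict.get?_mk_cons]
    have : (p.1 == c) = false := by
      simpa using h p (List.mem_cons_self ..)
    rw [this]
    · exact ih (fun q hq => h q (List.mem_cons_of_mem _ hq))

theorem pv_contains_mk_false (l : List (String × Int)) (c : String)
    (h : ∀ p ∈ l, p.1 ≠ c) : (PySem.Dict.mk l).contains c = false := by
  rw [PySem.Dict.contains_mk]
  simp only [List.any_eq_false]
  intro p hp
  simpa using h p hp

theorem pv_modify_fresh (l : List (String × Int)) (c : String)
    (h : ∀ p ∈ l, p.1 ≠ c) :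
    (PySem.Dict.mk l).modify c 0 (· + 1) = PySem.Dict.mk (l ++ [(c, 1)]) := by
  have hc := pv_contains_mk_false l c h
  apply PySem.Dict.ext
  show ((PySem.Dict.mk l).insert c ((PySem.Dict.mk l).getD c 0 + 1)).items = _
  rw [PySem.Dict.getD_of_not_contains _ _ hc,
      PySem.Dict.items_insert_of_not_contains _ _ hc]
  norm_num

theorem pv_modify_last (l : List (String × Int)) (c : String) (v : Int)
    (h : ∀ p ∈ l, p.1 ≠ c) :
    (PySem.Dict.mk (l ++ [(c, v)])).modify c 0 (· + 1) = PySem.Dict.mk (l ++ [(c, v + 1)]) := by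
  have hc : (PySem.Dict.mk (l ++ [(c, v)])).contains c = true := by
    rw [PySem.Dict.contains_mk]
    exact List.any_eq_true.2 ⟨(c, v), by simp, by simp⟩
  apply PySem.Dict.ext
  show ((PySem.Dict.mk (l ++ [(c, v)])).insert c _).items = _
  rw [pv_getD_mk_append l c v h, PySem.Dict.items_insert_of_contains _ _ hc]
  show (l ++ [(c, v)]).map (fun p => if p.1 == c then (c, v + 1) else p) = _
  rw [List.map_append]
  have hmap : l.map (fun p => if p.1 == c then (c, v + 1) else p) = l.map id :=
    List.map_congr_left (fun p hp => if_neg (by simpa using h p hp))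
  rw [hmap, List.map_id]
  simp

theorem pv_iter_last (k : Nat) (c : String) (l : List (String × Int)) (v : Int)
    (h : ∀ p ∈ l, p.1 ≠ c) :
    pvIter c k (PySem.Dict.mk (l ++ [(c, v)])) = PySem.Dict.mk (l ++ [(c, v + k)]) := by
  induction k generalizing v with
  | zero => simp [pvIter]
  | succ k ih =>
    show pvIter c k _ = _
    rw [pv_modify_last l c v h, ih (v + 1)]
    have hv : v + 1 + (k : Int) = v + ((k + 1 : Nat) : Int) := by push_cast; ring
    rw [hv]

theorem pv_inner_items (X : String → Bool) (c : String) (ts : List String)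
    (l : List (String × Int)) (h : ∀ p ∈ l, p.1 ≠ c) :
    ts.foldl (fun d t => if X t then d.modify c 0 (· + 1) else d) (PySem.Dict.mk l)
      = PySem.Dict.mk (l ++ if ts.countP X = 0 then [] else [(c, (ts.countP X : Int))]) := by
  rw [pv_foldl_iter]
  cases hk : ts.countP X with
  | zero => simp [pvIter]
  | succ k =>
    show pvIter c k ((PySem.Dict.mk l).modify c 0 (· + 1)) = _
    rw [pv_modify_fresh l c h, pv_iter_last k c l 1 h]
    have hv : (1 : Int) + (k : Int) = ((k + 1 : Nat) : Int) := by push_cast; ring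
    rw [hv]
    simp

theorem pv_outer (X : String → Bool) (cats : List (String × List String))
    (l : List (String × Int))
    (hl : ∀ p ∈ cats, ∀ q ∈ l, q.1 ≠ p.1) (hn : (cats.map Prod.fst).Nodup) :
    cats.foldl
      (fun d p => p.2.foldl (fun d t => if X t then d.modify p.1 0 (· + 1) else d) d)
      (PySem.Dict.mk l)
    = PySem.Dict.mk (l ++ cats.flatMap
        (fun p => if p.2.countP X = 0 then [] else [(p.1, (p.2.countP X : Int))])) := by
  induction cats generalizing l with
  | nil => simp
  | cons p cats ih =>
    simp only [List.foldl_cons, List.flatMap_cons]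
    rw [pv_inner_items X p.1 p.2 l (hl p (List.mem_cons_self ..)),
        ih (l ++ _) ?_ ?_, List.append_assoc]
    · intro r hr q hq
      have hn' : p.1 ∉ cats.map Prod.fst ∧ (cats.map Prod.fst).Nodup := by
        rw [List.map_cons] at hn
        exact List.nodup_cons.1 hn
      rcases List.mem_append.1 hq with hq | hq
      · exact hl r (List.mem_cons_of_mem _ hr) q hq
      · have hq1 : q.1 = p.1 := by
          by_cases hz : p.2.countP X = 0
          · simp [hz] at hq
          · simp only [hz, ite_false, List.mem_singleton] at hq
            simp [hq]
        rw [hq1]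
        intro he
        apply hn'.1
        rw [he]
        exact List.mem_map_of_mem hr
    · have hn' : p.1 ∉ cats.map Prod.fst ∧ (cats.map Prod.fst).Nodup := by
        rw [List.map_cons] at hn
        exact List.nodup_cons.1 hn
      exact hn'.2

theorem pv_flatMap_filter (X : String → Bool) (cats : List (String × List String)) :
    cats.flatMap (fun p => if p.2.countP X = 0 then [] else [(p.1, (p.2.countP X : Int))])
      = (cats.map (fun p => (p.1, (p.2.countP X : Int)))).filter (fun q => decide (q.2 ≠ 0)) := by
  induction cats with
  | nil => rfl
  | cons p cats ih =>
    simp only [List.flatMap_cons, List.map_cons, List.filter_cons]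
    by_cases hz : p.2.countP X = 0
    · rw [if_pos hz, List.nil_append, ih]
      have hd : (decide ((p.1, (p.2.countP X : Int)).2 ≠ 0)) = false := by simp [hz]
      rw [hd]
      simp
    · rw [if_neg hz, ih]
      have hd : (decide ((p.1, (p.2.countP X : Int)).2 ≠ 0)) = true := by
        simp only [decide_eq_true_eq]
        exact_mod_cast hz
      rw [hd, List.singleton_append]
      simp

-- ---- selection: head of the stable reverse sort = first strict max ----

def pvStep (acc p : String × Int) : String × Int := if acc.2 < p.2 then p else acc

def pvOpt (o : Option (String × Int)) (p : String × Int) : Option (String × Int) :=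
  match o with
  | none => some p
  | some a => some (if a.2 < p.2 then p else a)

theorem pv_head_sorted (xs : List (String × Int)) :
    (PySem.List.sorted xs (fun p => p.2) true).head? = xs.foldl pvOpt none := by
  rw [PySem.List.sorted_rev_eq_foldl_insertBy]
  induction xs using List.reverseRecOn with
  | nil => rfl
  | append_singleton xs x ih =>
    rw [List.foldl_append, List.foldl_append]
    simp only [List.foldl_cons, List.foldl_nil]
    rw [← ih]
    cases hA : xs.foldl (fun acc x =>
        PySem.List.insertBy (fun a b => decide ((fun p => p.2) b < (fun p => p.2) a)) x acc) [] with
    | nil => rfl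
    | cons a t =>
      show (PySem.List.insertBy _ x (a :: t)).head? = pvOpt (a :: t).head? x
      simp only [PySem.List.insertBy]
      by_cases hb : a.2 < x.2
      · rw [if_pos (by simpa using hb)]
        simp [pvOpt, hb]
      · rw [if_neg (by simpa using hb)]
        simp [pvOpt, hb]

theorem pv_opt_some (t : List (String × Int)) (a : String × Int) :
    t.foldl pvOpt (some a) = some (t.foldl pvStep a) := by
  induction t generalizing a with
  | nil => rfl
  | cons p t ih => exact ih _

theorem pv_skip_zero (l : List (String × Int)) (a : String × Int)
    (ha : 0 ≤ a.2) (h : ∀ p ∈ l, 0 ≤ p.2) :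
    l.foldl pvStep a = (l.filter (fun q => decide (q.2 ≠ 0))).foldl pvStep a := by
  induction l generalizing a with
  | nil => rfl
  | cons p l ih =>
    simp only [List.foldl_cons, List.filter_cons]
    by_cases hz : p.2 = 0
    · have hstep : pvStep a p = a := by
        unfold pvStep
        rw [if_neg (by omega)]
      simp only [hz]
      rw [hstep]
      simpa using ih a ha (fun q hq => h q (List.mem_cons_of_mem _ hq))
    · have : decide (p.2 ≠ 0) = true := by simp [hz]
      rw [this]
      simp only [List.foldl_cons]
      have ha' : 0 ≤ (pvStep a p).2 := by
        unfold pvStep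
        split
        · exact h p (List.mem_cons_self ..)
        · exact ha
      exact ih _ ha' (fun q hq => h q (List.mem_cons_of_mem _ hq))

theorem pv_select (L : List (String × Int)) (h : ∀ p ∈ L, 0 ≤ p.2) :
    (match PySem.List.sorted (L.filter (fun q => decide (q.2 ≠ 0))) (fun p => p.2) true with
     | q :: _ => q.1
     | [] => "General")
      = (L.foldl pvStep ("General", 0)).1 := by
  rw [pv_skip_zero L ("General", 0) (by norm_num) h]
  cases hF : L.filter (fun q => decide (q.2 ≠ 0)) with
  | nil => rfl
  | cons p t =>
    have hp : 0 < p.2 := by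
      have hmem : p ∈ L.filter (fun q => decide (q.2 ≠ 0)) := hF ▸ List.mem_cons_self ..
      have h1 := List.of_mem_filter hmem
      have h2 := h p (List.mem_of_mem_filter hmem)
      simp at h1
      omega
    have hh := pv_head_sorted (p :: t)
    rw [List.foldl_cons, show pvOpt none p = some p from rfl, pv_opt_some] at hh
    have hfirst : pvStep ("General", 0) p = p := by
      unfold pvStep
      rw [if_pos (by simpa using hp)]
    rw [List.foldl_cons, hfirst]
    cases hs : PySem.List.sorted (p :: t) (fun p => p.2) true with
    | nil => rw [hs] at hh; simp at hh
    | cons q r =>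
      rw [hs] at hh
      simp only [List.head?_cons] at hh
      have : q = t.foldl pvStep p := by injection hh
      simp [this]

def pvCatsLit : List (String × List String) :=
  [("Gaming", ["gaming", "games", "gamer", "gameplay", "playthrough", "minecraft", "fortnite"]),
   ("Technology", ["tech", "technology", "coding", "programming", "computers", "software", "hardware"]),
   ("Entertainment", ["vlog", "comedy", "funny", "entertainment", "reaction", "challenge"]),
   ("Music", ["music", "song", "singer", "band", "rap", "hip hop", "rock"]),
   ("Education", ["learn", "education", "tutorial", "how to", "course", "lesson"]),
   ("Lifestyle", ["lifestyle", "fashion", "beauty", "makeup", "fitness", "health"])]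

theorem pv_guard (F : List (String × Int)) :
    (if (PySem.Dict.mk F).size ≠ 0 then
       match PySem.List.sorted (PySem.Dict.mk F).items (fun p => p.2) true with
       | q :: _ => q.1
       | [] => "General"
     else "General")
      = (match PySem.List.sorted F (fun p => p.2) true with
         | q :: _ => q.1
         | [] => "General") := by
  cases F with
  | nil => rfl
  | cons p t =>
    rw [if_pos]
    · exact Nat.succ_ne_zero _

theorem pv_main (kws : List String) :
    (if (pvScoresA kws).size ≠ 0 then
       match PySem.List.sorted (pvScoresA kws).items (fun p => p.2) true with
       | q :: _ => q.1
       | [] => "General"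
     else "General")
    = (pvOrderB.foldl
        (fun (acc : String × Int) c =>
          if acc.2 < (List.countP (fun q => q.1 == c) (pvMatchedB kws) : Int) then
            (c, (List.countP (fun q => q.1 == c) (pvMatchedB kws) : Int))
          else acc)
        ("General", 0)).1 := by
  have hsc : pvScoresA kws = PySem.Dict.mk
      ((pvCatsLit.map (fun p =>
          (p.1, (p.2.countP (fun t => kws.any (fun kw => PySem.Str.isIn t kw)) : Int)))).filter
        (fun q => decide (q.2 ≠ 0))) := by
    unfold pvScoresA
    have hitems : pvCatsA.items = pvCatsLit := by decide
    rw [hitems, show (PySem.Dict.empty : PySem.Dict String Int) = PySem.Dict.mk [] from rfl,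
        pv_outer (fun t => kws.any (fun kw => PySem.Str.isIn t kw)) pvCatsLit [] (by simp) (by decide),
        pv_flatMap_filter, List.nil_append]
  rw [hsc, pv_guard, pv_select _ ?_]
  · have hs := pv_score kws
    simp only [pvOrderB, List.foldl_cons, List.foldl_nil]
    simp only [hs]
    rfl
  · rintro p hp
    obtain ⟨r, _, rfl⟩ := List.mem_map.1 hp
    exact Int.natCast_nonneg _

-- ===== VERDICT (by name: the statement is the Claim_ definition above) =====
theorem get_channel_category_spec : Claim_equal_get_channel_category := by
  intro o _
  cases o with
  | none => rfl
  | some s =>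
    unfold Spec_get_channel_category get_channel_category get_channel_category_alt
    dsimp only
    by_cases h : s = ""
    · rw [if_pos h, if_pos h]
    · rw [if_neg h, if_neg h]
      exact pv_main _
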